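-- pv_equiv track=rewrite | github.com/mistakeknot/tldr-swinton | src/tldr_swinton/engines/difflens.py | _extract_windowed_code
-- ===== SOURCE A (Python) =====
-- DIFF_CONTEXT_LINES = 6
--
-- def _merge_windows(diff_lines: list[int], context: int = DIFF_CONTEXT_LINES) -> list[tuple[int, int]]:
--     if not diff_lines:
--         return []
--     windows: list[tuple[int, int]] = []
--     sorted_lines = sorted(diff_lines)
--     start = sorted_lines[0] - context
--     end = sorted_lines[0] + context
--     for line in sorted_lines[1:]:
--         window_start = line - context
--         window_end = line + context
--         if window_start <= end + 1:
--             end = max(end, window_end)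
--         else:
--             windows.append((start, end))
--             start = window_start
--             end = window_end
--     windows.append((start, end))
--     return windows
--
-- def _extract_windowed_code(
--     src_lines: list[str],
--     diff_lines: list[int],
--     symbol_start: int,
--     symbol_end: int,
--     context: int = DIFF_CONTEXT_LINES,
-- ) -> str | None:
--     windows = _merge_windows(diff_lines, context)
--
--     clamped: list[tuple[int, int]] = []
--     for win_start, win_end in windows:
--         clamped_start = max(symbol_start, win_start)
--         clamped_end = min(symbol_end, win_end)
--         if clamped_start <= clamped_end:
--             clamped.append((clamped_start, clamped_end))
--
--     if not clamped:
--         return None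
--
--     parts: list[str] = []
--     for idx, (win_start, win_end) in enumerate(clamped):
--         if idx > 0:
--             parts.append("...")
--         parts.extend(src_lines[win_start - 1:win_end])
--
--     return "\n".join(parts)
-- ===== SOURCE B (Python) =====
-- DIFF_CONTEXT_LINES = 6
--
-- def _extract_windowed_code(
--     src_lines: list[str],
--     diff_lines: list[int],
--     symbol_start: int,
--     symbol_end: int,
--     context: int = DIFF_CONTEXT_LINES,
-- ) -> str | None:
--     # Sweep line over window boundaries: each diff line contributes +1 at
--     # (line - context) and -1 at (line + context + 1).  Walking the boundary
--     # positions in order, the running count is positive exactly on the covered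
--     # lines, so maximal covered runs open where the count becomes positive and
--     # close where it returns to zero; each closed run is clamped to the symbol
--     # range and emitted on the spot.
--     delta: dict[int, int] = {}
--     for line in diff_lines:
--         delta[line - context] = delta.get(line - context, 0) + 1
--         delta[line + context + 1] = delta.get(line + context + 1, 0) - 1
--
--     parts = None
--     count = 0
--     run_start = 0
--     for pos in sorted(delta):
--         d = delta[pos]
--         if count <= 0 < count + d:
--             run_start = pos
--         elif count > 0 >= count + d:
--             lo = max(symbol_start, run_start)
--             hi = min(symbol_end, pos - 1)
--             if lo <= hi:
--                 if parts is None: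
--                     parts = []
--                 else:
--                     parts.append("...")
--                 parts.extend(src_lines[lo - 1:hi])
--         count += d
--     return None if parts is None else "\n".join(parts)
-- ===== Notes on version B (the rewrite author's own statement) =====
-- stated objective: alternative
-- what changed: B replaces A's sort-the-lines/merge-intervals/clamp pipeline with a boundary-counting sweep line: it builds a dict of +1/-1 deltas at each window's boundaries, then walks the sorted boundary positions once with a running coverage count, emitting a clamped run each time the count returns to zero.
import Mathlib
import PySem

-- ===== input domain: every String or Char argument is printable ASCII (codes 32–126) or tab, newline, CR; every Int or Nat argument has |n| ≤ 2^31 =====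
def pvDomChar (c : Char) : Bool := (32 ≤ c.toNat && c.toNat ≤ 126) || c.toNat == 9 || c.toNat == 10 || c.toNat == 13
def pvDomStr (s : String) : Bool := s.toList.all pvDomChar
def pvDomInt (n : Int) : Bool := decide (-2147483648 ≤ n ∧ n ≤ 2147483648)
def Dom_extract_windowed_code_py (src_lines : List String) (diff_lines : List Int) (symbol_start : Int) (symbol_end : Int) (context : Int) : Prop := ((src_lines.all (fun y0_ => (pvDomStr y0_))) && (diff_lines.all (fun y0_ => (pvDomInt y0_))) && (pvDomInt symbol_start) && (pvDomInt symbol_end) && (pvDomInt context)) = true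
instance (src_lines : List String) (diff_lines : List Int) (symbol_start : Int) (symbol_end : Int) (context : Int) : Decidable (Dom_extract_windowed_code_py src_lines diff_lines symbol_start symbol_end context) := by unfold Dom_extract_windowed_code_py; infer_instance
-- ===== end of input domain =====

-- B replaces A's sort/merge-intervals/clamp pipeline with a boundary-counting sweep line
-- (±1 deltas at window boundaries, one ordered walk emitting clamped covered runs); same cost.

-- ===== PORT A =====
-- loop bodies of A, named so the proofs below can speak about them
def pvAStep (context : Int) (acc : List (Int × Int) × Int × Int) (line : Int) :
    List (Int × Int) × Int × Int :=
  if line - context ≤ acc.2.2 + 1 then (acc.1, acc.2.1, max acc.2.2 (line + context))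
  else (acc.1 ++ [(acc.2.1, acc.2.2)], line - context, line + context)

-- the final 'windows.append((start, end))' of _merge_windows
def pvFinish (st : List (Int × Int) × Int × Int) : List (Int × Int) :=
  st.1 ++ [(st.2.1, st.2.2)]

def pvClampStep (ss se : Int) (acc : List (Int × Int)) (w : Int × Int) : List (Int × Int) :=
  if max ss w.1 ≤ min se w.2 then acc ++ [(max ss w.1, min se w.2)] else acc

def pvPartsStep (src : List String) (parts : List String) (iw : Int × (Int × Int)) : List String :=
  (if iw.1 > 0 then parts ++ ["..."] else parts)
    ++ PySem.List.slice src (some (iw.2.1 - 1)) (some iw.2.2)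

def extract_windowed_code_py (src_lines : List String) (diff_lines : List Int) (symbol_start : Int) (symbol_end : Int) (context : Int) : Option String :=
  let windows : List (Int × Int) :=
    match PySem.List.sorted diff_lines (fun x => x) false with
    | [] => []
    | l0 :: rest => pvFinish (rest.foldl (pvAStep context) ([], l0 - context, l0 + context))
  let clamped : List (Int × Int) := windows.foldl (pvClampStep symbol_start symbol_end) []
  if clamped = [] then none
  else
    some (PySem.Str.join "\n"
      ((PySem.List.enumerate clamped).foldl (pvPartsStep src_lines) []))

-- ===== PORT B =====
-- B's first loop: delta[line-context] += 1 ; delta[line+context+1] -= 1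
def pvDeltaStep (context : Int) (d : PySem.Dict Int Int) (line : Int) : PySem.Dict Int Int :=
  let d1 := d.insert (line - context) (d.getD (line - context) 0 + 1)
  d1.insert (line + context + 1) (d1.getD (line + context + 1) 0 - 1)

-- B's sweep loop body; state = (parts, count, run_start)
def pvSweepStep (src : List String) (ss se : Int) (delta : PySem.Dict Int Int)
    (st : Option (List String) × Int × Int) (pos : Int) :
    Option (List String) × Int × Int :=
  let d := delta.getD pos 0
  if st.2.1 ≤ 0 ∧ 0 < st.2.1 + d then (st.1, st.2.1 + d, pos)
  else if 0 < st.2.1 ∧ st.2.1 + d ≤ 0 then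
    ((if max ss st.2.2 ≤ min se (pos - 1) then
        some ((match st.1 with | none => ([] : List String) | some p => p ++ ["..."]) ++
          PySem.List.slice src (some (max ss st.2.2 - 1)) (some (min se (pos - 1))))
      else st.1), st.2.1 + d, st.2.2)
  else (st.1, st.2.1 + d, st.2.2)

def extract_windowed_code_py_alt (src_lines : List String) (diff_lines : List Int) (symbol_start : Int) (symbol_end : Int) (context : Int) : Option String :=
  let delta := diff_lines.foldl (pvDeltaStep context) PySem.Dict.empty
  ((PySem.List.sorted delta.keys (fun x => x) false).foldl
      (pvSweepStep src_lines symbol_start symbol_end delta) (none, 0, 0)).1.map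
    (fun p => PySem.Str.join "\n" p)

-- ===== PRECONDITION & SPEC =====
def Spec_extract_windowed_code_py (src_lines : List String) (diff_lines : List Int) (symbol_start : Int) (symbol_end : Int) (context : Int) (out : Option String) : Prop := out = extract_windowed_code_py_alt src_lines diff_lines symbol_start symbol_end context
instance (src_lines : List String) (diff_lines : List Int) (symbol_start : Int) (symbol_end : Int) (context : Int) (out : Option String) : Decidable (Spec_extract_windowed_code_py src_lines diff_lines symbol_start symbol_end context out) := by unfold Spec_extract_windowed_code_py; infer_instance

-- ===== CLAIM (what is proved, stated in full; the proofs are below) =====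
def Claim_equal_extract_windowed_code_py : Prop := ∀ (src_lines : List String) (diff_lines : List Int) (symbol_start : Int) (symbol_end : Int) (context : Int), Dom_extract_windowed_code_py src_lines diff_lines symbol_start symbol_end context → Spec_extract_windowed_code_py src_lines diff_lines symbol_start symbol_end context (extract_windowed_code_py src_lines diff_lines symbol_start symbol_end context)

-- ===== LEMMAS AND PROOFS =====

-- abstract grouping of a sorted line list by gap threshold g, starting group (a, b)
def pvGroups (g : Int) (a b : Int) : List Int → List (Int × Int)
  | [] => [(a, b)]
  | y :: ys => if y ≤ b + g then pvGroups g a y ys else (a, b) :: pvGroups g y y ys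

def pvClamp (ss se : Int) (w : Int × Int) : Option (Int × Int) :=
  if max ss w.1 ≤ min se w.2 then some (max ss w.1, min se w.2) else none

def pvSlice (src : List String) (w : Int × Int) : List String :=
  PySem.List.slice src (some (w.1 - 1)) (some w.2)

-- proof-side emission per group (exactly the close-branch of the sweep, window = group ± c)
def pvEmitStep (src : List String) (ss se c : Int) (parts : Option (List String))
    (g : Int × Int) : Option (List String) :=
  if max ss (g.1 - c) ≤ min se (g.2 + c) then
    some ((match parts with | none => ([] : List String) | some p => p ++ ["..."]) ++
      PySem.List.slice src (some (max ss (g.1 - c) - 1)) (some (min se (g.2 + c))))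
  else parts

-- A's result, phrased over the abstract group list (common form both ports reach)
def pvResult (src : List String) (ss se c : Int) (G : List (Int × Int)) : Option String :=
  match G.filterMap (fun q => pvClamp ss se (q.1 - c, q.2 + c)) with
  | [] => none
  | w :: ws =>
    some (PySem.Str.join "\n" (pvSlice src w ++ ws.flatMap (fun v => "..." :: pvSlice src v)))

-- the per-position delta that the dict stores
def pvDelta (c : Int) (ds : List Int) (q : Int) : Int :=
  (ds.countP (fun l => l = q + c) : Int) - (ds.countP (fun l => l = q - c - 1) : Int)

theorem pvGroups_foldA (c : Int) (rest : List Int) :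
    ∀ (ws : List (Int × Int)) (a b : Int), (∀ y ∈ rest, b ≤ y) →
    rest.Pairwise (· ≤ ·) →
    pvFinish (rest.foldl (pvAStep c) (ws, a - c, b + c))
      = ws ++ (pvGroups (2 * c + 1) a b rest).map (fun p => (p.1 - c, p.2 + c)) := by
  induction rest with
  | nil => intro ws a b _ _; simp [pvGroups, pvFinish]
  | cons y ys ih =>
    intro ws a b hb hp
    rw [List.pairwise_cons] at hp
    obtain ⟨hy, hp'⟩ := hp
    have hb0 : b ≤ y := hb y (by simp)
    simp only [List.foldl_cons]
    by_cases h : y ≤ b + (2 * c + 1)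
    · have hcond : y - c ≤ b + c + 1 := by omega
      have hmax : max (b + c) (y + c) = y + c := by omega
      simp only [pvAStep, if_pos hcond, hmax]
      rw [ih ws a y hy hp']
      simp [pvGroups, h]
    · have hcond : ¬ (y - c ≤ b + c + 1) := by omega
      simp only [pvAStep, if_neg hcond]
      rw [ih (ws ++ [(a - c, b + c)]) y y hy hp']
      simp [pvGroups, h]

theorem pvFoldClamp (ss se : Int) (ws : List (Int × Int)) :
    ∀ acc, ws.foldl (pvClampStep ss se) acc = acc ++ ws.filterMap (pvClamp ss se) := by
  induction ws with
  | nil => intro acc; simp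
  | cons w ws ih =>
    intro acc
    by_cases h : max ss w.1 ≤ min se w.2
    · have h1 : pvClampStep ss se acc w = acc ++ [(max ss w.1, min se w.2)] := by
        simp only [pvClampStep, if_pos h]
      have h2 : pvClamp ss se w = some (max ss w.1, min se w.2) := by
        simp only [pvClamp, if_pos h]
      rw [List.foldl_cons, h1, ih, List.filterMap_cons_some h2, List.append_assoc,
        List.singleton_append]
    · have h1 : pvClampStep ss se acc w = acc := by simp only [pvClampStep, if_neg h]
      have h2 : pvClamp ss se w = none := by simp only [pvClamp, if_neg h]
      rw [List.foldl_cons, h1, ih, List.filterMap_cons_none h2]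

theorem pvFoldParts (src : List String) (ws : List (Int × Int)) :
    ∀ (s : Int) (p : List String), 1 ≤ s →
    (PySem.List.enumerate ws s).foldl (pvPartsStep src) p
      = p ++ ws.flatMap (fun w => "..." :: pvSlice src w) := by
  induction ws with
  | nil => intro s p _; simp [PySem.List.enumerate_nil]
  | cons w ws ih =>
    intro s p hs
    rw [PySem.List.enumerate_cons]
    simp only [List.foldl_cons, pvPartsStep]
    rw [if_pos (by omega : (s : Int) > 0)]
    rw [ih (s + 1) _ (by omega)]
    simp [pvSlice]

theorem pvEmitSome (src : List String) (ss se c : Int) (gs : List (Int × Int)) :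
    ∀ p, gs.foldl (pvEmitStep src ss se c) (some p)
      = some (p ++ (gs.filterMap (fun q => pvClamp ss se (q.1 - c, q.2 + c))).flatMap
          (fun w => "..." :: pvSlice src w)) := by
  induction gs with
  | nil => intro p; simp
  | cons q gs ih =>
    intro p
    simp only [List.foldl_cons, pvEmitStep, List.filterMap_cons]
    split_ifs with h
    · rw [ih]
      simp [pvClamp, h, pvSlice]
    · rw [ih]
      simp [pvClamp, h]

theorem pvEmitNone (src : List String) (ss se c : Int) (gs : List (Int × Int)) :
    gs.foldl (pvEmitStep src ss se c) none
      = (match gs.filterMap (fun q => pvClamp ss se (q.1 - c, q.2 + c)) with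
         | [] => none
         | w :: ws => some (pvSlice src w ++ ws.flatMap (fun v => "..." :: pvSlice src v))) := by
  induction gs with
  | nil => simp
  | cons q gs ih =>
    simp only [List.foldl_cons, pvEmitStep, List.filterMap_cons]
    split_ifs with h
    · rw [pvEmitSome]
      simp [pvClamp, h, pvSlice]
    · rw [ih]
      simp [pvClamp, h]

theorem pvEmit_result (src : List String) (ss se c : Int) (G : List (Int × Int)) :
    (G.foldl (pvEmitStep src ss se c) none).map (fun p => PySem.Str.join "\n" p)
      = pvResult src ss se c G := by
  rw [pvEmitNone]
  cases h : G.filterMap (fun q => pvClamp ss se (q.1 - c, q.2 + c)) with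
  | nil => simp [pvResult, h]
  | cons w ws => simp [pvResult, h]

theorem pvClampNeg (ss se c : Int) (hc : c < 0) (G : List (Int × Int))
    (hG : ∀ q ∈ G, q.1 = q.2) :
    G.filterMap (fun q => pvClamp ss se (q.1 - c, q.2 + c)) = [] := by
  rw [List.filterMap_eq_nil_iff]
  intro q hq
  have hq' : q.1 = q.2 := hG q hq
  have hno : ¬ (max ss (q.1 - c) ≤ min se (q.2 + c)) := by
    have h1 : q.1 - c ≤ max ss (q.1 - c) := le_max_right _ _
    have h2 : min se (q.2 + c) ≤ q.2 + c := min_le_right _ _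
    omega
  simp only [pvClamp, if_neg hno]

theorem pvGroups_neg (g : Int) (hg : g < 0) (xs : List Int) :
    ∀ (a b : Int), (∀ y ∈ xs, b ≤ y) → xs.Pairwise (· ≤ ·) →
    pvGroups g a b xs = (a, b) :: xs.map (fun l => (l, l)) := by
  induction xs with
  | nil => intro a b _ _; simp [pvGroups]
  | cons y ys ih =>
    intro a b hb hp
    rw [List.pairwise_cons] at hp
    obtain ⟨hy, hp'⟩ := hp
    have hb0 : b ≤ y := hb y (by simp)
    rw [show pvGroups g a b (y :: ys) = (a, b) :: pvGroups g y y ys by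
      simp [pvGroups]; omega]
    rw [ih y y hy hp']
    simp

theorem pvA_result (src : List String) (diff : List Int) (ss se c : Int)
    (l0 : Int) (rest : List Int)
    (hS : PySem.List.sorted diff (fun x => x) false = l0 :: rest)
    (hb : ∀ y ∈ rest, l0 ≤ y) (hp' : rest.Pairwise (· ≤ ·)) :
    extract_windowed_code_py src diff ss se c
      = pvResult src ss se c (pvGroups (2 * c + 1) l0 l0 rest) := by
  unfold extract_windowed_code_py pvResult
  simp only [hS]
  rw [pvGroups_foldA c rest [] l0 l0 hb hp', List.nil_append, pvFoldClamp, List.nil_append,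
    List.filterMap_map]
  have hcomp : (pvClamp ss se ∘ fun p : Int × Int => (p.1 - c, p.2 + c))
      = (fun q : Int × Int => pvClamp ss se (q.1 - c, q.2 + c)) := rfl
  rw [hcomp]
  cases hcl : (pvGroups (2 * c + 1) l0 l0 rest).filterMap
      (fun q : Int × Int => pvClamp ss se (q.1 - c, q.2 + c)) with
  | nil => simp
  | cons w ws =>
    rw [if_neg (List.cons_ne_nil w ws)]
    rw [PySem.List.enumerate_cons, List.foldl_cons]
    rw [show pvPartsStep src [] ((0 : Int), w) = pvSlice src w from by
      simp [pvPartsStep, pvSlice]]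
    rw [pvFoldParts src ws (0 + 1) (pvSlice src w) (by norm_num)]

-- ---------- delta-dict characterization ----------

theorem pvDelta_getD (c : Int) (ds : List Int) :
    ∀ (d : PySem.Dict Int Int) (p : Int),
    (ds.foldl (pvDeltaStep c) d).getD p 0 = d.getD p 0 + pvDelta c ds p := by
  induction ds with
  | nil => intro d p; simp [pvDelta]
  | cons l ds' ih =>
    intro d p
    rw [List.foldl_cons, ih]
    have hstep : (pvDeltaStep c d l).getD p 0
        = d.getD p 0 + (if l = p + c then 1 else 0) - (if l = p - c - 1 then 1 else 0) := by
      simp only [pvDeltaStep, PySem.Dict.getD_insert]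
      rcases eq_or_ne p (l + c + 1) with rfl | hp1
      · rw [if_pos rfl, if_neg (by omega : (l + c + 1 : Int) ≠ l - c),
          if_neg (by omega : ¬ l = l + c + 1 + c), if_pos (by omega : l = l + c + 1 - c - 1)]
        omega
      · rw [if_neg hp1]
        rcases eq_or_ne p (l - c) with rfl | hp2
        · rw [if_pos rfl, if_pos (by omega : l = l - c + c), if_neg (by omega : ¬ l = l - c - c - 1)]
          omega
        · rw [if_neg hp2, if_neg (by omega : ¬ l = p + c), if_neg (by omega : ¬ l = p - c - 1)]
          omega
    rw [hstep]
    simp only [pvDelta, List.countP_cons, decide_eq_true_eq]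
    push_cast
    split_ifs <;> omega

theorem pvDelta_keys_mem (c : Int) (ds : List Int) :
    ∀ (d : PySem.Dict Int Int) (p : Int),
    p ∈ (ds.foldl (pvDeltaStep c) d).keys
      ↔ p ∈ d.keys ∨ ∃ l ∈ ds, p = l - c ∨ p = l + c + 1 := by
  induction ds with
  | nil => intro d p; simp
  | cons l ds' ih =>
    intro d p
    rw [List.foldl_cons, ih]
    simp only [pvDeltaStep, PySem.Dict.mem_keys_insert, List.mem_cons]
    constructor
    · rintro (h | h)
      · rcases h with h | h | h
        · exact Or.inr ⟨l, Or.inl rfl, Or.inr h⟩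
        · exact Or.inr ⟨l, Or.inl rfl, Or.inl h⟩
        · exact Or.inl h
      · obtain ⟨x, hx, hor⟩ := h
        exact Or.inr ⟨x, Or.inr hx, hor⟩
    · rintro (h | ⟨x, hx | hx, hor⟩)
      · exact Or.inl (Or.inr (Or.inr h))
      · subst hx
        rcases hor with h | h
        · exact Or.inl (Or.inr (Or.inl h))
        · exact Or.inl (Or.inl h)
      · exact Or.inr ⟨x, hx, hor⟩

theorem pvDelta_keys_nodup (c : Int) (ds : List Int) :
    ∀ (d : PySem.Dict Int Int), d.keys.Nodup → (ds.foldl (pvDeltaStep c) d).keys.Nodup := by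
  induction ds with
  | nil => intro d h; exact h
  | cons l ds' ih =>
    intro d h
    rw [List.foldl_cons]
    exact ih _ (PySem.Dict.nodup_keys_insert _ _ _ (PySem.Dict.nodup_keys_insert _ _ _ h))

-- ---------- counting helpers ----------

theorem pvCount_mono (ds : List Int) (x y : Int) (hxy : x ≤ y) :
    ds.countP (fun t => t ≤ x) ≤ ds.countP (fun t => t ≤ y) := by
  apply List.countP_mono_left
  intro t _ ht
  simp only [decide_eq_true_eq] at ht ⊢
  omega

theorem pvCount_strict (ds : List Int) (x y l : Int) (hl : l ∈ ds) (h1 : x < l) (h2 : l ≤ y) :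
    ds.countP (fun t => t ≤ x) < ds.countP (fun t => t ≤ y) := by
  induction ds with
  | nil => simp at hl
  | cons a ds' ih =>
    simp only [List.countP_cons, decide_eq_true_eq]
    rcases List.mem_cons.mp hl with rfl | ha
    · have hmono := pvCount_mono ds' x y (by omega)
      split_ifs <;> omega
    · have := ih ha
      split_ifs <;> omega

theorem pvCount_gap (ds : List Int) (x y : Int) (hxy : x ≤ y)
    (h : ∀ l ∈ ds, ¬(x < l ∧ l ≤ y)) :
    ds.countP (fun t => t ≤ y) = ds.countP (fun t => t ≤ x) := by
  apply le_antisymm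
  · apply List.countP_mono_left
    intro t ht hty
    have := h t ht
    simp only [decide_eq_true_eq] at hty ⊢
    omega
  · apply List.countP_mono_left
    intro t _ htx
    simp only [decide_eq_true_eq] at htx ⊢
    omega

-- sum over the ≤-p prefix of a nodup list of a single-spike function
theorem pvSingletonSum (x p v : Int) :
    ∀ (K : List Int), K.Nodup → x ∈ K →
    ((K.filter (fun q => q ≤ p)).map (fun q => if q = x then v else 0)).sum
      = if x ≤ p then v else 0 := by
  intro K
  induction K with
  | nil => intro _ h; simp at h
  | cons k K' ih =>
    intro hnd hx
    have hzero : ∀ (L : List Int), x ∉ L →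
        ((L.filter (fun q => q ≤ p)).map (fun q => if q = x then v else 0)).sum = 0 := by
      intro L hxL
      apply List.sum_eq_zero
      intro t ht
      obtain ⟨q, hq, rfl⟩ := List.mem_map.mp ht
      have : q ∈ L := List.mem_of_mem_filter hq
      rw [if_neg (by rintro rfl; exact hxL this)]
    rcases List.mem_cons.mp hx with rfl | hx'
    · have hnotin : x ∉ K' := (List.nodup_cons.mp hnd).1
      by_cases hkp : x ≤ p
      · rw [List.filter_cons_of_pos (by simpa using hkp), List.map_cons, List.sum_cons,
          if_pos rfl, hzero K' hnotin, if_pos hkp, add_zero]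
      · rw [List.filter_cons_of_neg (by simpa using hkp), hzero K' hnotin, if_neg hkp]
    · have hkx : k ≠ x := by rintro rfl; exact (List.nodup_cons.mp hnd).1 hx'
      have ih' := ih (List.nodup_cons.mp hnd).2 hx'
      by_cases hkp : k ≤ p
      · rw [List.filter_cons_of_pos (by simpa using hkp), List.map_cons, List.sum_cons,
          if_neg hkx, ih', zero_add]
      · rw [List.filter_cons_of_neg (by simpa using hkp), ih']

theorem pvPrefixSum (c p : Int) (K : List Int) (hnd : K.Nodup) :
    ∀ (ds : List Int), (∀ l ∈ ds, (l - c) ∈ K ∧ (l + c + 1) ∈ K) →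
    ((K.filter (fun q => q ≤ p)).map (pvDelta c ds)).sum
      = (ds.countP (fun l => l ≤ p + c) : Int) - (ds.countP (fun l => l ≤ p - c - 1) : Int) := by
  intro ds
  induction ds with
  | nil =>
    intro _
    have hz : ∀ q, pvDelta c ([] : List Int) q = 0 := by intro q; simp [pvDelta]
    rw [List.map_congr_left (fun q _ => hz q)]
    simp
  | cons l ds' ih =>
    intro hmem
    have hl := hmem l (by simp)
    have hrec := ih (fun t ht => hmem t (by simp [ht]))
    have hfun : ∀ q, pvDelta c (l :: ds') q
        = pvDelta c ds' q + ((if q = l - c then (1:Int) else 0) + (if q = l + c + 1 then (-1:Int) else 0)) := by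
      intro q
      simp only [pvDelta, List.countP_cons, decide_eq_true_eq]
      push_cast
      split_ifs <;> omega
    rw [List.map_congr_left (fun q _ => hfun q)]
    rw [PySem.List.sum_map_add_int]
    rw [PySem.List.sum_map_add_int]
    rw [hrec, pvSingletonSum (l - c) p 1 K hnd hl.1, pvSingletonSum (l + c + 1) p (-1) K hnd hl.2]
    simp only [List.countP_cons, decide_eq_true_eq]
    push_cast
    split_ifs <;> omega

-- ---------- structure of A's groups over the sorted line list ----------

theorem pvGroupFacts (c : Int) (S : Int → Prop) :
    ∀ (xs : List Int) (a b : Int),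
    xs.Pairwise (· ≤ ·) → (∀ y ∈ xs, b ≤ y) → (∀ y ∈ xs, S y) →
    a ≤ b → S a → S b →
    (∀ x, a - c ≤ x → x ≤ b + c → ∃ l, S l ∧ x - c ≤ l ∧ l ≤ x + c) →
    (∀ fe ∈ pvGroups (2*c+1) a b xs,
        a ≤ fe.1 ∧ fe.1 ≤ fe.2 ∧ S fe.1 ∧ S fe.2 ∧
        ∀ x, fe.1 - c ≤ x → x ≤ fe.2 + c → ∃ l, S l ∧ x - c ≤ l ∧ l ≤ x + c) ∧
    (∀ fe ∈ pvGroups (2*c+1) a b xs, ∀ l, ((a ≤ l ∧ l ≤ b) ∨ l ∈ xs) →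
        ¬(fe.2 < l ∧ l ≤ fe.2 + (2*c+1))) ∧
    (pvGroups (2*c+1) a b xs).Pairwise (fun u v => u.2 + (2*c+1) < v.1) ∧
    (∀ l, ((a ≤ l ∧ l ≤ b) ∨ l ∈ xs) → ∃ fe ∈ pvGroups (2*c+1) a b xs, fe.1 ≤ l ∧ l ≤ fe.2) := by
  intro xs
  induction xs with
  | nil =>
    intro a b _ _ _ hab hsa hsb hcov
    refine ⟨?_, ?_, ?_, ?_⟩
    · intro fe hfe
      simp only [pvGroups, List.mem_singleton] at hfe
      subst hfe
      exact ⟨le_refl a, hab, hsa, hsb, hcov⟩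
    · intro fe hfe l hl
      simp only [pvGroups, List.mem_singleton] at hfe
      subst hfe
      rcases hl with ⟨_, h2⟩ | h
      · simp only []; omega
      · simp at h
    · simp [pvGroups]
    · intro l hl
      rcases hl with ⟨h1, h2⟩ | h
      · exact ⟨(a, b), by simp [pvGroups], h1, h2⟩
      · simp at h
  | cons y ys ih =>
    intro a b hp hge hS hab hsa hsb hcov
    rw [List.pairwise_cons] at hp
    obtain ⟨hy, hp'⟩ := hp
    have hby : b ≤ y := hge y (by simp)
    by_cases h : y ≤ b + (2*c+1)
    · rw [show pvGroups (2*c+1) a b (y :: ys) = pvGroups (2*c+1) a y ys by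
        simp [pvGroups, h]]
      have hcov' : ∀ x, a - c ≤ x → x ≤ y + c → ∃ l, S l ∧ x - c ≤ l ∧ l ≤ x + c := by
        intro x h1 h2
        by_cases hxb : x ≤ b + c
        · exact hcov x h1 hxb
        · exact ⟨y, hS y (by simp), by omega, by omega⟩
      obtain ⟨C1, C2, C3, C4⟩ := ih a y hp' hy (fun t ht => hS t (by simp [ht]))
        (by omega) hsa (hS y (by simp)) hcov'
      refine ⟨C1, ?_, C3, ?_⟩
      · intro fe hfe l hl
        apply C2 fe hfe l
        rcases hl with ⟨h1, h2⟩ | hmem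
        · exact Or.inl ⟨h1, by omega⟩
        · rcases List.mem_cons.mp hmem with rfl | hys
          · exact Or.inl ⟨by omega, le_refl l⟩
          · exact Or.inr hys
      · intro l hl
        apply C4 l
        rcases hl with ⟨h1, h2⟩ | hmem
        · exact Or.inl ⟨h1, by omega⟩
        · rcases List.mem_cons.mp hmem with rfl | hys
          · exact Or.inl ⟨by omega, le_refl l⟩
          · exact Or.inr hys
    · rw [show pvGroups (2*c+1) a b (y :: ys) = (a, b) :: pvGroups (2*c+1) y y ys by
        simp [pvGroups, h]]
      have hcov'' : ∀ x, y - c ≤ x → x ≤ y + c → ∃ l, S l ∧ x - c ≤ l ∧ l ≤ x + c := by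
        intro x h1 h2
        exact ⟨y, hS y (by simp), by omega, by omega⟩
      obtain ⟨D1, D2, D3, D4⟩ := ih y y hp' hy (fun t ht => hS t (by simp [ht]))
        (le_refl y) (hS y (by simp)) (hS y (by simp)) hcov''
      have hmemy : ∀ l, l ∈ y :: ys → y ≤ l := by
        intro l hml
        rcases List.mem_cons.mp hml with rfl | hys
        · exact le_refl l
        · exact hy l hys
      refine ⟨?_, ?_, ?_, ?_⟩
      · intro fe hfe
        rcases List.mem_cons.mp hfe with rfl | hfe'
        · exact ⟨le_refl a, hab, hsa, hsb, hcov⟩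
        · obtain ⟨hy1, hy2, hs1, hs2, hc'⟩ := D1 fe hfe'
          exact ⟨by omega, hy2, hs1, hs2, hc'⟩
      · intro fe hfe l hl
        rcases List.mem_cons.mp hfe with rfl | hfe'
        · rcases hl with ⟨h1, h2⟩ | hmem
          · simp only []; omega
          · have := hmemy l hmem
            simp only []; omega
        · obtain ⟨hy1, hy2, _, _, _⟩ := D1 fe hfe'
          rcases hl with ⟨h1, h2⟩ | hmem
          · intro ⟨hlt, _⟩; omega
          · apply D2 fe hfe' l
            rcases List.mem_cons.mp hmem with rfl | hys
            · exact Or.inl ⟨le_refl l, le_refl l⟩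
            · exact Or.inr hys
      · rw [List.pairwise_cons]
        refine ⟨?_, D3⟩
        intro v hv
        obtain ⟨hy1, _, _, _, _⟩ := D1 v hv
        simp only []; omega
      · intro l hl
        rcases hl with ⟨h1, h2⟩ | hmem
        · exact ⟨(a, b), by simp, h1, h2⟩
        · have hl' : (y ≤ l ∧ l ≤ y) ∨ l ∈ ys := by
            rcases List.mem_cons.mp hmem with rfl | hys
            · exact Or.inl ⟨le_refl l, le_refl l⟩
            · exact Or.inr hys
          obtain ⟨fe, hfe, hq⟩ := D4 l hl'
          exact ⟨fe, by simp [hfe], hq⟩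

-- ---------- splitting a strictly sorted list at a threshold ----------

theorem pvSplitLE (E : Int) :
    ∀ (K : List Int), K.Pairwise (· < ·) →
    ∃ B K', K = B ++ K' ∧ (∀ p ∈ B, p ≤ E) ∧ (∀ p ∈ K', E < p) := by
  intro K
  induction K with
  | nil => intro _; exact ⟨[], [], rfl, by simp, by simp⟩
  | cons k K0 ih =>
    intro hp
    rw [List.pairwise_cons] at hp
    obtain ⟨hk, hp'⟩ := hp
    by_cases hkE : k ≤ E
    · obtain ⟨B0, K0', heq, hB, hK⟩ := ih hp'
      refine ⟨k :: B0, K0', by simp [heq], ?_, hK⟩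
      intro p hpm
      rcases List.mem_cons.mp hpm with rfl | hm
      · exact hkE
      · exact hB p hm
    · refine ⟨[], k :: K0, rfl, by simp, ?_⟩
      intro p hpm
      rcases List.mem_cons.mp hpm with rfl | hm
      · omega
      · have := hk p hm; omega

-- ---------- the sweep ----------

-- the close-branch of the sweep, as a function of the emitted run's last covered line hi
def pvClose (src : List String) (ss se : Int) (parts : Option (List String)) (rs hi : Int) :
    Option (List String) :=
  if max ss rs ≤ min se hi then
    some ((match parts with | none => ([] : List String) | some p => p ++ ["..."]) ++
      PySem.List.slice src (some (max ss rs - 1)) (some (min se hi)))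
  else parts

theorem pvOpenRun (src : List String) (ss se : Int) (delta : PySem.Dict Int Int) (E : Int) :
    ∀ (B : List Int) (count : Int) (parts : Option (List String)) (rs : Int),
    B.Pairwise (· < ·) → (∀ p ∈ B, p ≤ E) → E ∈ B → 0 < count →
    (∀ p ∈ B, p < E →
      0 < count + ((B.filter (fun q => q ≤ p)).map (fun q => delta.getD q 0)).sum) →
    (count + (B.map (fun q => delta.getD q 0)).sum = 0) →
    B.foldl (pvSweepStep src ss se delta) (parts, count, rs)
      = (pvClose src ss se parts rs (E - 1), 0, rs) := by
  intro B
  induction B with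
  | nil => intro count parts rs _ _ hE; simp at hE
  | cons p B' ih =>
    intro count parts rs hpw hle hE hc hpos hz
    rw [List.pairwise_cons] at hpw
    obtain ⟨hplt, hpw'⟩ := hpw
    rw [List.foldl_cons]
    cases B' with
    | nil =>
      have hpE : p = E := by
        rcases List.mem_cons.mp hE with h | h
        · omega
        · simp at h
      subst hpE
      have hd : count + delta.getD p 0 = 0 := by
        simpa using hz
      have hstep : pvSweepStep src ss se delta (parts, count, rs) p
          = (pvClose src ss se parts rs (p - 1), 0, rs) := by
        simp only [pvSweepStep, pvClose]
        rw [if_neg (by omega : ¬ (count ≤ 0 ∧ 0 < count + delta.getD p 0)),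
          if_pos (⟨hc, by omega⟩ : 0 < count ∧ count + delta.getD p 0 ≤ 0)]
        rw [show count + delta.getD p 0 = 0 from hd]
      rw [hstep]
      simp
    | cons q B'' =>
      have hpE : p < E := by
        rcases List.mem_cons.mp hE with heq | hmem
        · exfalso
          have h1 := hplt q (by simp)
          have h2 := hle q (by simp)
          omega
        · exact hplt E hmem
      have hfp : (p :: q :: B'').filter (fun t => t ≤ p) = [p] := by
        rw [List.filter_cons_of_pos (by simp)]
        congr 1
        rw [List.filter_eq_nil_iff]
        intro t ht
        have := hplt t ht
        simp; omega
      have hdp : 0 < count + delta.getD p 0 := by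
        have := hpos p (by simp) hpE
        rw [hfp] at this
        simpa using this
      have hstep : pvSweepStep src ss se delta (parts, count, rs) p
          = (parts, count + delta.getD p 0, rs) := by
        simp only [pvSweepStep]
        rw [if_neg (by omega : ¬ (count ≤ 0 ∧ 0 < count + delta.getD p 0)),
          if_neg (by omega : ¬ (0 < count ∧ count + delta.getD p 0 ≤ 0))]
      rw [hstep]
      have hEmem : E ∈ q :: B'' := by
        rcases List.mem_cons.mp hE with h | h
        · omega
        · exact h
      apply ih (count + delta.getD p 0) parts rs hpw'
        (fun t ht => hle t (by simp [ht])) hEmem hdp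
      · intro t ht htE
        have h1 := hpos t (by simp [ht]) htE
        have hft : (p :: q :: B'').filter (fun u => u ≤ t)
            = p :: ((q :: B'').filter (fun u => u ≤ t)) := by
          rw [List.filter_cons_of_pos (by simp; exact le_of_lt (hplt t ht))]
        rw [hft, List.map_cons, List.sum_cons] at h1
        omega
      · rw [List.map_cons, List.sum_cons] at hz
        omega

theorem pvSweepMain (src : List String) (ss se c : Int) (delta : PySem.Dict Int Int)
    (hc : 0 ≤ c) :
    ∀ (G : List (Int × Int)) (K : List Int) (parts : Option (List String)) (r : Int),
    K.Pairwise (· < ·) →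
    G.Pairwise (fun u v => u.2 + (2*c+1) < v.1) →
    (∀ g ∈ G, g.1 ≤ g.2) →
    (∀ g ∈ G, (g.1 - c) ∈ K ∧ (g.2 + c + 1) ∈ K) →
    (∀ p ∈ K, ∃ g ∈ G, g.1 - c ≤ p ∧ p ≤ g.2 + c + 1) →
    (∀ g ∈ G, ∀ p, g.1 - c ≤ p → p ≤ g.2 + c →
      0 < ((K.filter (fun q => q ≤ p)).map (fun q => delta.getD q 0)).sum) →
    (∀ g ∈ G, ((K.filter (fun q => q ≤ g.2 + c + 1)).map (fun q => delta.getD q 0)).sum = 0) →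
    ∃ r', K.foldl (pvSweepStep src ss se delta) (parts, 0, r)
          = (G.foldl (pvEmitStep src ss se c) parts, 0, r') := by
  intro G
  induction G with
  | nil =>
    intro K parts r _ _ _ _ hK _ _
    cases K with
    | nil => exact ⟨r, rfl⟩
    | cons p K0 =>
      obtain ⟨g, hg, _⟩ := hK p (by simp)
      simp at hg
  | cons g G' ih =>
    intro K parts r hKpw hGpw hGle hmem hK hpos hzero
    rw [List.pairwise_cons] at hGpw
    obtain ⟨hgsep, hGpw'⟩ := hGpw
    have hg12 : g.1 ≤ g.2 := hGle g (by simp)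
    obtain ⟨B, K', heq, hB, hK'⟩ := pvSplitLE (g.2 + c + 1) K hKpw
    subst heq
    have hBpw : B.Pairwise (· < ·) := (List.pairwise_append.mp hKpw).1
    have hK'pw : K'.Pairwise (· < ·) := (List.pairwise_append.mp hKpw).2.1
    have hmemg := hmem g (by simp)
    have hw1K : g.1 - c ∈ B := by
      rcases List.mem_append.mp hmemg.1 with h | h
      · exact h
      · have := hK' _ h; omega
    have hEK : g.2 + c + 1 ∈ B := by
      rcases List.mem_append.mp hmemg.2 with h | h
      · exact h
      · have := hK' _ h; omega
    have hBlow : ∀ p ∈ B, g.1 - c ≤ p := by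
      intro p hpB
      obtain ⟨g'', hg'', hq1, hq2⟩ := hK p (List.mem_append.mpr (Or.inl hpB))
      rcases List.mem_cons.mp hg'' with rfl | hg'm
      · exact hq1
      · have hsep := hgsep g'' hg'm
        have := hB p hpB
        omega
    obtain ⟨w1, Brest, hBeq⟩ : ∃ w1 Brest, B = w1 :: Brest := by
      cases B with
      | nil => simp at hw1K
      | cons w1 Brest => exact ⟨w1, Brest, rfl⟩
    subst hBeq
    have hw1 : w1 = g.1 - c := by
      have h1 := hBlow w1 (by simp)
      rcases List.mem_cons.mp hw1K with h | h
      · omega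
      · have := (List.pairwise_cons.mp hBpw).1 _ h
        omega
    subst hw1
    have hBrestgt : ∀ p ∈ Brest, g.1 - c < p := (List.pairwise_cons.mp hBpw).1
    have hfilterw1 : (((g.1 - c) :: Brest) ++ K').filter (fun q => q ≤ g.1 - c)
        = [g.1 - c] := by
      rw [List.filter_append, List.filter_cons_of_pos (by simp)]
      have h1 : Brest.filter (fun q => q ≤ g.1 - c) = [] := by
        rw [List.filter_eq_nil_iff]; intro t ht; have := hBrestgt t ht; simp; omega
      have h2 : K'.filter (fun q => q ≤ g.1 - c) = [] := by
        rw [List.filter_eq_nil_iff]; intro t ht; have := hK' t ht; simp; omega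
      rw [h1, h2]
      simp
    have hdw1 : 0 < delta.getD (g.1 - c) 0 := by
      have := hpos g (by simp) (g.1 - c) (le_refl _) (by omega)
      rw [hfilterw1] at this
      simpa using this
    rw [List.foldl_append, List.foldl_cons]
    have hstep1 : pvSweepStep src ss se delta (parts, 0, r) (g.1 - c)
        = (parts, delta.getD (g.1 - c) 0, g.1 - c) := by
      simp only [pvSweepStep]
      rw [if_pos (⟨le_refl 0, by omega⟩ : (0:Int) ≤ 0 ∧ 0 < 0 + delta.getD (g.1 - c) 0)]
      rw [zero_add]
    rw [hstep1]
    -- run through the rest of the block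
    have hEBrest : g.2 + c + 1 ∈ Brest := by
      rcases List.mem_cons.mp hEK with h | h
      · omega
      · exact h
    have hfilter_block : ∀ p : Int, p ≤ g.2 + c + 1 →
        (((g.1 - c) :: Brest) ++ K').filter (fun q => q ≤ p)
          = ((g.1 - c) :: Brest).filter (fun q => q ≤ p) := by
      intro p hpE
      rw [List.filter_append]
      have h2 : K'.filter (fun q => q ≤ p) = [] := by
        rw [List.filter_eq_nil_iff]; intro t ht; have := hK' t ht; simp; omega
      rw [h2, List.append_nil]
    have hrun := pvOpenRun src ss se delta (g.2 + c + 1) Brest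
      (delta.getD (g.1 - c) 0) parts (g.1 - c)
      (List.pairwise_cons.mp hBpw).2
      (fun t ht => hB t (by simp [ht])) hEBrest hdw1
      (by
        intro p hpBrest hpE
        have h1 := hpos g (by simp) p (le_of_lt (hBrestgt p hpBrest)) (by omega)
        rw [hfilter_block p (by omega)] at h1
        rw [List.filter_cons_of_pos (by
            simp only [decide_eq_true_eq]
            have := hBrestgt p hpBrest
            omega),
          List.map_cons, List.sum_cons] at h1
        omega)
      (by
        have h1 := hzero g (by simp)
        rw [hfilter_block (g.2 + c + 1) (le_refl _)] at h1
        have hfull : ((g.1 - c) :: Brest).filter (fun q => q ≤ g.2 + c + 1)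
            = (g.1 - c) :: Brest := by
          rw [List.filter_eq_self]
          intro t ht
          have := hB t ht
          simp; omega
        rw [hfull, List.map_cons, List.sum_cons] at h1
        omega)
    rw [hrun]
    rw [show (g.2 + c + 1 - 1 : Int) = g.2 + c from by omega]
    have hclose : pvClose src ss se parts (g.1 - c) (g.2 + c)
        = pvEmitStep src ss se c parts g := by
      simp only [pvClose, pvEmitStep]
    rw [hclose]
    -- the tail: recurse on the remaining groups over K'
    have hblocksum : (((g.1 - c) :: Brest).map (fun q => delta.getD q 0)).sum
        = (((((g.1 - c) :: Brest) ++ K').filter (fun q => q ≤ g.2 + c + 1)).map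
            (fun q => delta.getD q 0)).sum := by
      rw [hfilter_block (g.2 + c + 1) (le_refl _)]
      have hfull : ((g.1 - c) :: Brest).filter (fun q => q ≤ g.2 + c + 1)
          = (g.1 - c) :: Brest := by
        rw [List.filter_eq_self]
        intro t ht
        have := hB t ht
        simp; omega
      rw [hfull]
    obtain ⟨r', hrec⟩ := ih K' (pvEmitStep src ss se c parts g) (g.1 - c) hK'pw hGpw'
      (fun t ht => hGle t (by simp [ht]))
      (by
        intro g' hg'
        have hm := hmem g' (by simp [hg'])
        have hsep := hgsep g' hg'
        have hg'12 := hGle g' (by simp [hg'])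
        constructor
        · rcases List.mem_append.mp hm.1 with h | h
          · have := hB _ h; omega
          · exact h
        · rcases List.mem_append.mp hm.2 with h | h
          · have := hB _ h; omega
          · exact h)
      (by
        intro p hpK'
        obtain ⟨g'', hg'', hq⟩ := hK p (List.mem_append.mpr (Or.inr hpK'))
        rcases List.mem_cons.mp hg'' with rfl | hg'm
        · have := hK' p hpK'; omega
        · exact ⟨g'', hg'm, hq⟩)
      (by
        intro g' hg' p hp1 hp2
        have hsep := hgsep g' hg'
        have h1 := hpos g' (by simp [hg']) p hp1 hp2
        have hsplit : ((((g.1 - c) :: Brest) ++ K')).filter (fun q => q ≤ p)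
            = ((g.1 - c) :: Brest) ++ K'.filter (fun q => q ≤ p) := by
          rw [List.filter_append]
          congr 1
          rw [List.filter_eq_self]
          intro t ht
          have := hB t ht
          simp
          omega
        rw [hsplit, List.map_append, List.sum_append] at h1
        have hz := hzero g (by simp)
        rw [← hblocksum] at hz
        omega)
      (by
        intro g' hg'
        have hsep := hgsep g' hg'
        have hg'12 := hGle g' (by simp [hg'])
        have h1 := hzero g' (by simp [hg'])
        have hsplit : ((((g.1 - c) :: Brest) ++ K')).filter (fun q => q ≤ g'.2 + c + 1)
            = ((g.1 - c) :: Brest) ++ K'.filter (fun q => q ≤ g'.2 + c + 1) := by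
          rw [List.filter_append]
          congr 1
          rw [List.filter_eq_self]
          intro t ht
          have := hB t ht
          simp
          omega
        rw [hsplit, List.map_append, List.sum_append] at h1
        have hz := hzero g (by simp)
        rw [← hblocksum] at hz
        omega)
    exact ⟨r', by rw [hrec, List.foldl_cons]⟩

-- when every prefix sum is ≤ 0 (context < 0) the sweep never opens a run
theorem pvSweepNone (src : List String) (ss se : Int) (delta : PySem.Dict Int Int) :
    ∀ (K : List Int) (count : Int) (parts : Option (List String)) (r : Int),
    K.Pairwise (· < ·) → count ≤ 0 →
    (∀ p ∈ K, count + ((K.filter (fun q => q ≤ p)).map (fun q => delta.getD q 0)).sum ≤ 0) →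
    (K.foldl (pvSweepStep src ss se delta) (parts, count, r)).1 = parts := by
  intro K
  induction K with
  | nil => intro count parts r _ _ _; rfl
  | cons p K' ih =>
    intro count parts r hpw hc hle
    rw [List.pairwise_cons] at hpw
    obtain ⟨hplt, hpw'⟩ := hpw
    have hfp : (p :: K').filter (fun t => t ≤ p) = [p] := by
      rw [List.filter_cons_of_pos (by simp)]
      congr 1
      rw [List.filter_eq_nil_iff]
      intro t ht
      have := hplt t ht
      simp; omega
    have hdp : count + delta.getD p 0 ≤ 0 := by
      have := hle p (by simp)
      rw [hfp] at this
      simpa using this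
    rw [List.foldl_cons]
    have hstep : pvSweepStep src ss se delta (parts, count, r) p
        = (parts, count + delta.getD p 0, r) := by
      simp only [pvSweepStep]
      rw [if_neg (by omega : ¬ (count ≤ 0 ∧ 0 < count + delta.getD p 0)),
        if_neg (by omega : ¬ (0 < count ∧ count + delta.getD p 0 ≤ 0))]
    rw [hstep]
    apply ih (count + delta.getD p 0) parts r hpw' hdp
    intro t ht
    have h1 := hle t (by simp [ht])
    have hft : (p :: K').filter (fun u => u ≤ t) = p :: (K'.filter (fun u => u ≤ t)) := by
      rw [List.filter_cons_of_pos (by simp; exact le_of_lt (hplt t ht))]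
    rw [hft, List.map_cons, List.sum_cons] at h1
    omega

-- ===== VERDICT (by name: the statement is the Claim_ definition above) =====
theorem extract_windowed_code_py_spec : Claim_equal_extract_windowed_code_py := by
  intro src diff ss se c _
  unfold Spec_extract_windowed_code_py
  rcases hS : PySem.List.sorted diff (fun x => x) false with _ | ⟨l0, rest⟩
  · -- diff is empty: both sides are none
    have hp0 := PySem.List.sorted_perm diff (fun x : Int => x) false
    rw [hS] at hp0
    have hd : diff = [] := List.perm_nil.mp hp0.symm
    subst hd
    rfl
  · have hpair : (l0 :: rest).Pairwise (· ≤ ·) := by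
      have h := PySem.List.sorted_pairwise (xs := diff) (key := fun x : Int => x)
      rw [hS] at h
      simpa using h
    rw [List.pairwise_cons] at hpair
    obtain ⟨hb, hp'⟩ := hpair
    rw [pvA_result src diff ss se c l0 rest hS hb hp']
    obtain ⟨delta, hdeltadef⟩ : ∃ d, diff.foldl (pvDeltaStep c) PySem.Dict.empty = d := ⟨_, rfl⟩
    obtain ⟨K, hKdef⟩ : ∃ k, PySem.List.sorted delta.keys (fun x => x) false = k := ⟨_, rfl⟩
    have halt : extract_windowed_code_py_alt src diff ss se c
        = (K.foldl (pvSweepStep src ss se delta) (none, 0, 0)).1.map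
            (fun p => PySem.Str.join "\n" p) := by
      rw [← hKdef, ← hdeltadef]
      rfl
    have hmemdiff : ∀ y, y ∈ l0 :: rest ↔ y ∈ diff := by
      intro y
      rw [← hS]
      exact PySem.List.mem_sorted diff (fun x => x) false y
    have hkeysnd : delta.keys.Nodup := by
      rw [← hdeltadef]
      exact pvDelta_keys_nodup c diff PySem.Dict.empty PySem.Dict.nodup_keys_empty
    have hKperm : K.Perm delta.keys := by
      rw [← hKdef]
      exact PySem.List.sorted_perm _ _ _
    have hKnd : K.Nodup := hKperm.nodup_iff.mpr hkeysnd
    have hKle : K.Pairwise (· ≤ ·) := by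
      rw [← hKdef]
      have := PySem.List.sorted_pairwise (xs := delta.keys) (key := fun x : Int => x)
      simpa using this
    have hKpw : K.Pairwise (· < ·) := by
      have h1 : K.Pairwise (· ≠ ·) := hKnd
      exact (List.pairwise_and_iff.mpr ⟨hKle, h1⟩).imp (fun h => lt_of_le_of_ne h.1 h.2)
    have hmemK : ∀ p, p ∈ K ↔ ∃ l ∈ diff, p = l - c ∨ p = l + c + 1 := by
      intro p
      rw [← hKdef, PySem.List.mem_sorted delta.keys (fun x => x) false p, ← hdeltadef,
        pvDelta_keys_mem c diff PySem.Dict.empty p]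
      simp [PySem.Dict.keys_empty]
    have hget : ∀ p, delta.getD p 0 = pvDelta c diff p := by
      intro p
      rw [← hdeltadef, pvDelta_getD c diff PySem.Dict.empty p]
      simp [PySem.Dict.getD_empty]
    have hsum : ∀ p, ((K.filter (fun q => q ≤ p)).map (fun q => delta.getD q 0)).sum
        = (diff.countP (fun l => l ≤ p + c) : Int)
          - (diff.countP (fun l => l ≤ p - c - 1) : Int) := by
      intro p
      rw [List.map_congr_left (fun q _ => hget q)]
      exact pvPrefixSum c p K hKnd diff
        (fun l hl => ⟨(hmemK _).mpr ⟨l, hl, Or.inl rfl⟩, (hmemK _).mpr ⟨l, hl, Or.inr rfl⟩⟩)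
    by_cases hc : 0 ≤ c
    · -- context ≥ 0: both ports compute pvResult over the groups
      obtain ⟨C1, C2, C3, C4⟩ := pvGroupFacts c (· ∈ diff) rest l0 l0 hp' hb
        (fun y hy => (hmemdiff y).mp (by simp [hy]))
        (le_refl l0) ((hmemdiff l0).mp (by simp)) ((hmemdiff l0).mp (by simp))
        (fun x h1 h2 => ⟨l0, (hmemdiff l0).mp (by simp), by omega, by omega⟩)
      have hscope : ∀ l, l ∈ diff → ((l0 ≤ l ∧ l ≤ l0) ∨ l ∈ rest) := by
        intro l hl
        rcases List.mem_cons.mp ((hmemdiff l).mpr hl) with rfl | h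
        · exact Or.inl ⟨le_refl l, le_refl l⟩
        · exact Or.inr h
      obtain ⟨r', hfold⟩ := pvSweepMain src ss se c delta hc
        (pvGroups (2 * c + 1) l0 l0 rest) K none 0 hKpw C3
        (fun g hg => (C1 g hg).2.1)
        (fun g hg => by
          obtain ⟨_, _, hs1, hs2, _⟩ := C1 g hg
          exact ⟨(hmemK _).mpr ⟨g.1, hs1, Or.inl rfl⟩,
            (hmemK _).mpr ⟨g.2, hs2, Or.inr rfl⟩⟩)
        (fun p hp => by
          obtain ⟨l, hl, hor⟩ := (hmemK p).mp hp
          obtain ⟨fe, hfe, h1, h2⟩ := C4 l (hscope l hl)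
          exact ⟨fe, hfe, by rcases hor with rfl | rfl <;> omega⟩)
        (fun g hg p h1 h2 => by
          rw [hsum p]
          obtain ⟨_, _, _, _, hcov⟩ := C1 g hg
          obtain ⟨l, hl, hl1, hl2⟩ := hcov p h1 h2
          have := pvCount_strict diff (p - c - 1) (p + c) l hl (by omega) (by omega)
          omega)
        (fun g hg => by
          rw [hsum (g.2 + c + 1)]
          have hgap : ∀ l ∈ diff, ¬(g.2 < l ∧ l ≤ g.2 + (2*c+1)) :=
            fun l hl => C2 g hg l (hscope l hl)
          have hcg := pvCount_gap diff g.2 (g.2 + (2*c+1)) (by omega) hgap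
          have e1 : g.2 + c + 1 + c = g.2 + (2*c+1) := by ring
          have e2 : g.2 + c + 1 - c - 1 = g.2 := by ring
          simp only [e1, e2]
          omega)
      rw [halt, hfold]
      exact (pvEmit_result src ss se c (pvGroups (2 * c + 1) l0 l0 rest)).symm
    · -- context < 0: every window is empty; both sides return none
      have hGA := pvGroups_neg (2 * c + 1) (by omega) rest l0 l0 hb hp'
      have hclA : (pvGroups (2 * c + 1) l0 l0 rest).filterMap
          (fun q : Int × Int => pvClamp ss se (q.1 - c, q.2 + c)) = [] := by
        apply pvClampNeg ss se c (by omega)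
        rw [hGA]
        intro q hq
        rcases List.mem_cons.mp hq with rfl | h
        · rfl
        · obtain ⟨l, _, rfl⟩ := List.mem_map.mp h
          rfl
      have hAnone : pvResult src ss se c (pvGroups (2 * c + 1) l0 l0 rest) = none := by
        unfold pvResult
        rw [hclA]
      rw [hAnone]
      have hBnone := pvSweepNone src ss se delta K 0 none 0 hKpw (le_refl 0) (by
        intro p hp
        rw [zero_add, hsum p]
        have := pvCount_mono diff (p + c) (p - c - 1) (by omega)
        omega)
      rw [halt, hBnone]
      rfl
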